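-- pv_equiv track=rewrite | github.com/jwt625/comsol-mph-extraction | few-shot-examples/create_few_shot_examples.py | clean_matlab_code
-- ===== SOURCE A (Python) =====
-- def clean_matlab_code(code: str) -> str:
--     """Clean and format the MATLAB code for better presentation."""
--     # Remove excessive whitespace
--     lines = []
--     for line in code.split('\n'):
--         stripped = line.rstrip()
--         if stripped or (lines and lines[-1].strip()):  # Keep empty lines only if previous line has content
--             lines.append(stripped)
--
--     # Remove trailing empty lines
--     while lines and not lines[-1].strip():
--         lines.pop()
--
--     return '\n'.join(lines)
-- ===== SOURCE B (Python) =====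
-- def clean_matlab_code(code: str) -> str:
--     """Clean and format the MATLAB code for better presentation."""
--     paragraphs = []
--     current = []
--     for line in code.split('\n'):
--         s = line.rstrip()
--         if s:
--             current.append(s)
--         elif current:
--             paragraphs.append('\n'.join(current))
--             current = []
--     if current:
--         paragraphs.append('\n'.join(current))
--     return '\n\n'.join(paragraphs)
-- ===== Notes on version B (the rewrite author's own statement) =====
-- stated objective: alternative
-- what changed: B replaces A's flat accumulator with a look-back at the previous kept line plus a trailing while-pop pass by a single grouping pass that collects nonempty rstripped lines into paragraphs and joins the paragraphs with a blank-line separator.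
import Mathlib
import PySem

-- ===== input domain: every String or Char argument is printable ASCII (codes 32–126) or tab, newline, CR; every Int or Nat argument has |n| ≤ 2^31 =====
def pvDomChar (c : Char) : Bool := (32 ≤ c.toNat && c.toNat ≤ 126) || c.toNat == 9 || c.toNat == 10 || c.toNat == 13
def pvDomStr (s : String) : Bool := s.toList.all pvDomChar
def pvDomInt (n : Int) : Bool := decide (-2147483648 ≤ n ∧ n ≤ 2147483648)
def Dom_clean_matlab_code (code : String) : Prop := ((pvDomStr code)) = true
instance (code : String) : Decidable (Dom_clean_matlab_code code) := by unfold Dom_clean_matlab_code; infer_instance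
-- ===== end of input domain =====

-- B replaces A's flat accumulator (with a look-back at the previous kept line and a
-- trailing while-pop) by grouping nonempty rstripped lines into paragraphs joined with a
-- blank-line separator (objective: alternative, same cost).

-- ===== PORT A =====
-- the body of A's for-loop: append the rstripped line iff it is nonempty or the last kept line has content
def pvStepA (lines : List String) (line : String) : List String :=
  let stripped := PySem.Str.rstrip line
  if stripped ≠ "" ∨ (lines ≠ [] ∧ PySem.Str.strip (lines.getLastD "") ≠ "") then
    lines ++ [stripped]
  else lines

-- A's 'while lines and not lines[-1].strip(): lines.pop()'
def pvPopBlanks (lines : List String) : List String :=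
  if h : lines ≠ [] ∧ PySem.Str.strip (lines.getLastD "") = "" then
    pvPopBlanks lines.dropLast
  else lines
termination_by lines.length
decreasing_by
  cases lines with
  | nil => exact absurd rfl h.1
  | cons a t => simp

def clean_matlab_code (code : String) : String :=
  let lines := ((PySem.Str.split? code "\n").getD []).foldl pvStepA []
  PySem.Str.join "\n" (pvPopBlanks lines)

-- ===== PORT B =====
-- the body of B's for-loop over state (paragraphs, current)
def pvStepB (st : List String × List String) (line : String) : List String × List String :=
  let s := PySem.Str.rstrip line
  if s ≠ "" then (st.1, st.2 ++ [s])
  else if st.2 ≠ [] then (st.1 ++ [PySem.Str.join "\n" st.2], [])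
  else st

def clean_matlab_code_alt (code : String) : String :=
  let st := ((PySem.Str.split? code "\n").getD []).foldl pvStepB ([], [])
  PySem.Str.join "\n\n" (if st.2 ≠ [] then st.1 ++ [PySem.Str.join "\n" st.2] else st.1)

-- ===== PRECONDITION & SPEC =====
def Spec_clean_matlab_code (code : String) (out : String) : Prop := out = clean_matlab_code_alt code
instance (code : String) (out : String) : Decidable (Spec_clean_matlab_code code out) := by unfold Spec_clean_matlab_code; infer_instance

-- ===== CLAIM (what is proved, stated in full; the proofs are below) =====
def Claim_equal_clean_matlab_code : Prop := ∀ (code : String), Dom_clean_matlab_code code → Spec_clean_matlab_code code (clean_matlab_code code)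

-- ===== LEMMAS AND PROOFS =====

-- a kept nonempty rstripped line: nonempty and with non-whitespace content
def pvGood (s : String) : Prop := s ≠ "" ∧ PySem.Str.strip s ≠ ""

-- A's kept-lines list corresponding to B's flushed paragraphs: each paragraph followed by one blank line
def pvGlue (Q : List (List String)) : List String := Q.flatMap (fun q => q ++ [""])

lemma pv_forall_space_of_dropWhile {l : List Char}
    (h : ∀ y ∈ List.dropWhile PySem.Chars.isspace l, PySem.Chars.isspace y = true) :
    ∀ y ∈ l, PySem.Chars.isspace y = true := by
  intro y hy
  rw [← List.takeWhile_append_dropWhile (p := PySem.Chars.isspace) (l := l)] at hy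
  rcases List.mem_append.1 hy with h' | h'
  · exact List.mem_takeWhile_imp h'
  · exact h y h'

lemma pv_rstrip_eq_nil_iff (l : List Char) :
    PySem.Chars.rstrip l = [] ↔ ∀ y ∈ l, PySem.Chars.isspace y = true := by
  simp only [PySem.Chars.rstrip, List.reverse_eq_nil_iff, List.dropWhile_eq_nil_iff,
    List.mem_reverse]

lemma pv_strip_eq_nil_iff (l : List Char) :
    PySem.Chars.strip l = [] ↔ ∀ y ∈ l, PySem.Chars.isspace y = true := by
  constructor
  · intro h
    simp only [PySem.Chars.strip, PySem.Chars.lstrip, pv_rstrip_eq_nil_iff] at h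
    exact pv_forall_space_of_dropWhile h
  · intro h
    simp only [PySem.Chars.strip, PySem.Chars.lstrip, pv_rstrip_eq_nil_iff]
    intro y hy
    exact h y ((List.dropWhile_suffix _).subset hy)

lemma pv_ofList_eq_empty_iff (cs : List Char) : String.ofList cs = "" ↔ cs = [] := by
  constructor
  · intro h; have := congrArg String.toList h; simpa using this
  · intro h; subst h; rfl

-- the crucial fact: a rstripped line is "" or has non-whitespace content
lemma pv_good_rstrip (line : String) (h : PySem.Str.rstrip line ≠ "") :
    pvGood (PySem.Str.rstrip line) := by
  refine ⟨h, ?_⟩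
  intro hstrip
  apply h
  rw [PySem.Str.rstrip, pv_ofList_eq_empty_iff, pv_rstrip_eq_nil_iff]
  rw [PySem.Str.strip, pv_ofList_eq_empty_iff] at hstrip
  have h2 : ∀ y ∈ (PySem.Str.rstrip line).toList, PySem.Chars.isspace y = true := by
    rw [PySem.Str.rstrip, String.toList_ofList] at hstrip ⊢
    exact (pv_strip_eq_nil_iff _).1 hstrip
  rw [PySem.Str.rstrip, String.toList_ofList] at h2
  have h3 : PySem.Chars.rstrip (PySem.Chars.rstrip line.toList) = [] :=
    (pv_rstrip_eq_nil_iff _).2 h2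
  rw [PySem.Chars.rstrip, PySem.Chars.rstrip, List.reverse_reverse,
    List.dropWhile_idempotent] at h3
  intro y hy
  have : line.toList.reverse.dropWhile PySem.Chars.isspace = [] := by
    simpa [PySem.Chars.rstrip] using congrArg List.reverse h3
  rw [List.dropWhile_eq_nil_iff] at this
  exact this y (by simpa using hy)

lemma pv_getLastD_append (xs ys : List String) (h : ys ≠ []) :
    (xs ++ ys).getLastD "" = ys.getLastD "" := by
  simp [List.getLastD_eq_getLast?, List.getLast?_append, List.getLast?_eq_some_getLast h]

lemma pv_getLastD_mem (xs : List String) (h : xs ≠ []) : xs.getLastD "" ∈ xs := by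
  simp [List.getLastD_eq_getLast?, List.getLast?_eq_some_getLast h]

lemma pv_strip_empty : PySem.Str.strip "" = "" := by decide

lemma pv_popBlanks_nil : pvPopBlanks [] = [] := by
  rw [pvPopBlanks]; simp

lemma pv_popBlanks_of_good_last (xs : List String)
    (h : PySem.Str.strip (xs.getLastD "") ≠ "") : pvPopBlanks xs = xs := by
  rw [pvPopBlanks, dif_neg (fun hc => h hc.2)]

lemma pv_glue_append_singleton (Q : List (List String)) (q : List String) :
    pvGlue (Q ++ [q]) = pvGlue Q ++ (q ++ [""]) := by
  simp [pvGlue]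

lemma pv_glue_getLastD (Q : List (List String)) (h : Q ≠ []) :
    (pvGlue Q).getLastD "" = "" := by
  conv_lhs => rw [← List.dropLast_append_getLast h, pv_glue_append_singleton]
  rw [pv_getLastD_append _ _ (by simp)]
  rw [pv_getLastD_append _ [""] (by simp)]
  rfl

lemma pv_glue_ne_nil (Q : List (List String)) (h : Q ≠ []) : pvGlue Q ≠ [] := by
  cases Q with
  | nil => exact absurd rfl h
  | cons q Q' => simp [pvGlue]

lemma pv_join_cons_ne (sep x : String) (ys : List String) (h : ys ≠ []) :
    PySem.Str.join sep (x :: ys) = x ++ sep ++ PySem.Str.join sep ys := by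
  cases ys with
  | nil => exact absurd rfl h
  | cons y t =>
    apply String.toList_inj.mp
    simp [PySem.Str.join, PySem.Chars.join_cons_cons]

lemma pv_join_singleton (sep x : String) : PySem.Str.join sep [x] = x := by
  apply String.toList_inj.mp
  simp [PySem.Str.join, PySem.Chars.join, List.intercalate]

lemma pv_join_append (sep : String) (xs ys : List String) (hxs : xs ≠ []) (hys : ys ≠ []) :
    PySem.Str.join sep (xs ++ ys) = PySem.Str.join sep xs ++ sep ++ PySem.Str.join sep ys := by
  induction xs with
  | nil => exact absurd rfl hxs
  | cons x t ih =>
    cases t with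
    | nil => simp [pv_join_cons_ne sep x ys hys, pv_join_singleton]
    | cons b u =>
      rw [List.cons_append, pv_join_cons_ne sep x ((b :: u) ++ ys) (by simp),
        ih (by simp), pv_join_cons_ne sep x (b :: u) (by simp)]
      simp [String.append_assoc]

lemma pv_join_glue (Q : List (List String)) (cur : List String)
    (hQ : ∀ q ∈ Q, q ≠ []) (hcur : cur ≠ []) :
    PySem.Str.join "\n" (pvGlue Q ++ cur)
      = PySem.Str.join "\n\n" (Q.map (PySem.Str.join "\n") ++ [PySem.Str.join "\n" cur]) := by
  induction Q with
  | nil =>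
    simp only [pvGlue, List.flatMap_nil, List.nil_append, List.map_nil]
    exact (pv_join_singleton _ _).symm
  | cons q Q' ih =>
    have hq : q ≠ [] := hQ q (by simp)
    have hQ' : ∀ p ∈ Q', p ≠ [] := fun p hp => hQ p (by simp [hp])
    have h1 : pvGlue (q :: Q') ++ cur = q ++ ([""] ++ (pvGlue Q' ++ cur)) := by
      simp [pvGlue]
    rw [h1, pv_join_append "\n" q _ hq (by simp), List.singleton_append,
        pv_join_cons_ne "\n" "" (pvGlue Q' ++ cur) (by simp [hcur]),
        ih hQ', List.map_cons, List.cons_append,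
        pv_join_cons_ne "\n\n" _ _ (by simp)]
    apply String.toList_inj.mp
    simp [String.toList_append]

lemma pv_main (ls : List String) (Q : List (List String)) (cur : List String)
    (hQ : ∀ q ∈ Q, q ≠ [] ∧ ∀ s ∈ q, pvGood s)
    (hcur : ∀ s ∈ cur, pvGood s) :
    PySem.Str.join "\n" (pvPopBlanks (ls.foldl pvStepA (pvGlue Q ++ cur)))
      = PySem.Str.join "\n\n"
          (let st := ls.foldl pvStepB (Q.map (PySem.Str.join "\n"), cur)
           if st.2 ≠ [] then st.1 ++ [PySem.Str.join "\n" st.2] else st.1) := by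
  induction ls generalizing Q cur with
  | nil =>
    simp only [List.foldl_nil]
    by_cases hc : cur = []
    · subst hc
      by_cases hq : Q = []
      · subst hq
        simp only [pvGlue, List.flatMap_nil, List.append_nil, pv_popBlanks_nil]
        rfl
      · rw [List.append_nil]
        rw [pvPopBlanks, dif_pos ⟨pv_glue_ne_nil Q hq, by
          rw [pv_glue_getLastD Q hq]; exact pv_strip_empty⟩]
        have hlast : Q.getLast hq ∈ Q := List.getLast_mem hq
        have hdrop : (pvGlue Q).dropLast = pvGlue Q.dropLast ++ Q.getLast hq := by
          conv_lhs => rw [← List.dropLast_append_getLast hq, pv_glue_append_singleton]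
          rw [← List.append_assoc, List.dropLast_concat]
        rw [hdrop]
        have hlq : Q.getLast hq ≠ [] := (hQ _ hlast).1
        rw [pv_popBlanks_of_good_last _ (by
          rw [pv_getLastD_append _ _ hlq]
          exact ((hQ _ hlast).2 _ (pv_getLastD_mem _ hlq)).2)]
        rw [pv_join_glue Q.dropLast (Q.getLast hq)
          (fun p hp => (hQ p (List.mem_of_mem_dropLast hp)).1) hlq]
        simp only [ne_eq, not_true_eq_false, if_false]
        congr 1
        rw [show [PySem.Str.join "\n" (Q.getLast hq)]
            = List.map (PySem.Str.join "\n") [Q.getLast hq] from rfl,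
          ← List.map_append, List.dropLast_append_getLast hq]
    · rw [pv_popBlanks_of_good_last _ (by
        rw [pv_getLastD_append _ _ hc]
        exact (hcur _ (pv_getLastD_mem _ hc)).2)]
      rw [if_pos hc]
      exact pv_join_glue Q cur (fun q hq => (hQ q hq).1) hc
  | cons line t ih =>
    simp only [List.foldl_cons]
    by_cases hse : PySem.Str.rstrip line = ""
    · by_cases hc : cur = []
      · subst hc
        have hA : pvStepA (pvGlue Q ++ []) line = pvGlue Q ++ [] := by
          rw [pvStepA]
          simp only [hse, ne_eq, not_true_eq_false, false_or, List.append_nil]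
          rw [if_neg]
          rintro ⟨hne, hgl⟩
          have hq : Q ≠ [] := by rintro rfl; exact hne rfl
          exact hgl (by rw [pv_glue_getLastD Q hq]; exact pv_strip_empty)
        have hB : pvStepB (Q.map (PySem.Str.join "\n"), []) line
            = (Q.map (PySem.Str.join "\n"), []) := by
          rw [pvStepB]
          simp [hse]
        rw [hA, hB]
        exact ih Q [] hQ (by simp)
      · have hA : pvStepA (pvGlue Q ++ cur) line = pvGlue (Q ++ [cur]) ++ [] := by
          rw [pvStepA]
          simp only [hse]
          rw [if_pos (Or.inr ⟨by simp [hc], by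
            rw [pv_getLastD_append _ _ hc]
            exact (hcur _ (pv_getLastD_mem _ hc)).2⟩)]
          rw [pv_glue_append_singleton]
          simp
        have hB : pvStepB (Q.map (PySem.Str.join "\n"), cur) line
            = ((Q ++ [cur]).map (PySem.Str.join "\n"), []) := by
          rw [pvStepB]
          simp [hse, hc]
        rw [hA, hB]
        exact ih (Q ++ [cur]) []
          (by
            intro q hq
            rcases List.mem_append.1 hq with h | h
            · exact hQ q h
            · simp only [List.mem_singleton] at h
              subst h
              exact ⟨hc, hcur⟩)
          (by simp)
    · have hA : pvStepA (pvGlue Q ++ cur) line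
          = pvGlue Q ++ (cur ++ [PySem.Str.rstrip line]) := by
        rw [pvStepA]
        simp [hse]
      have hB : pvStepB (Q.map (PySem.Str.join "\n"), cur) line
          = (Q.map (PySem.Str.join "\n"), cur ++ [PySem.Str.rstrip line]) := by
        rw [pvStepB]
        simp [hse]
      rw [hA, hB]
      exact ih Q (cur ++ [PySem.Str.rstrip line]) hQ
        (by
          intro x hx
          rcases List.mem_append.1 hx with h | h
          · exact hcur x h
          · simp only [List.mem_singleton] at h
            subst h
            exact pv_good_rstrip line hse)

-- ===== VERDICT (by name: the statement is the Claim_ definition above) =====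
theorem clean_matlab_code_spec : Claim_equal_clean_matlab_code := by
  intro code _
  unfold Spec_clean_matlab_code clean_matlab_code clean_matlab_code_alt
  have := pv_main ((PySem.Str.split? code "\n").getD []) [] []
    (by intro q hq; simp at hq) (by intro s hs; simp at hs)
  simpa [pvGlue] using this
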